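-- pv_equiv track=rewrite | github.com/namdnhn/ripples-scripts | filter/makeMNK.py | getK
-- ===== SOURCE A (Python) =====
-- def getK(seq, a, b):
--     myPath = []
--     currentPlace = 0
--     for k in seq:
--         if k == a:
--             currentPlace += 1
--         else:
--             currentPlace -= 1
--         myPath.append(currentPlace)
--     maxDesc = 0
--     for i in range(1,len(myPath)):
--         if max(myPath[:i])-myPath[i] > maxDesc:
--             maxDesc = max(myPath[:i])-myPath[i]
--     return(maxDesc)
-- ===== SOURCE B (Python) =====
-- def getK(seq, a, b):
--     # Single pass: track the cumulative walk value, the running maximum of the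
--     # strict prefix, and the best descent seen so far.  O(n) instead of O(n^2).
--     cur = 0
--     runmax = None
--     maxdesc = 0
--     for k in seq:
--         cur += 1 if k == a else -1
--         if runmax is not None and runmax - cur > maxdesc:
--             maxdesc = runmax - cur
--         if runmax is None or cur > runmax:
--             runmax = cur
--     return maxdesc
-- ===== Notes on version B (the rewrite author's own statement) =====
-- stated objective: faster
-- what changed: Replaces the O(n^2) loop that recomputes max(myPath[:i]) for every index with a single pass that maintains the running maximum of the prefix alongside the cumulative walk value, so no path list is materialised.
import Mathlib
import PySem

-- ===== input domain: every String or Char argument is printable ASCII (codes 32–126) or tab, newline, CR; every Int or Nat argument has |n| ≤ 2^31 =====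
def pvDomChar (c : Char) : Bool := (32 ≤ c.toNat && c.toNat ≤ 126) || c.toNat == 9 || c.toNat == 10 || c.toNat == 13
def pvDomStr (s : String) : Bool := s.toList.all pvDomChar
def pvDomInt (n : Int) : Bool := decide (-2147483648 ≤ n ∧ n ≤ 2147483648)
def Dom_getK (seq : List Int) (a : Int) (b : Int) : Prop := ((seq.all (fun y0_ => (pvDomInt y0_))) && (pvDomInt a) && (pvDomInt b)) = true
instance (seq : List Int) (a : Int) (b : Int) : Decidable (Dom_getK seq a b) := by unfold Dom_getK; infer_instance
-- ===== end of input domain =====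

-- B replaces A's quadratic recomputation of max(myPath[:i]) at every index by a
-- single pass maintaining the running prefix maximum; objective: faster.

-- ===== PORT A =====
def getK (seq : List Int) (a : Int) (b : Int) : Int :=
  let st := seq.foldl (fun (st : List Int × Int) k =>
      let currentPlace := if k == a then st.2 + 1 else st.2 - 1
      (st.1 ++ [currentPlace], currentPlace)) ([], 0)
  let myPath := st.1
  -- max(myPath[:i]) never sees an empty list (i ≥ 1), so `.getD 0` is exact here
  (PySem.List.pyRange 1 (myPath.length : Int) 1).foldl (fun maxDesc i =>
      let m := (PySem.List.max? (PySem.List.slice myPath (some 0) (some i)) (fun y => y)).getD 0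
      let v := (PySem.List.pyGet? myPath i).getD 0
      if m - v > maxDesc then m - v else maxDesc) 0

-- ===== PORT B =====
def getK_alt (seq : List Int) (a : Int) (b : Int) : Int :=
  (seq.foldl (fun (st : Int × Option Int × Int) k =>
      let cur := st.1 + (if k == a then 1 else -1)
      let md := match st.2.1 with
        | some r => if r - cur > st.2.2 then r - cur else st.2.2
        | none => st.2.2
      let rm : Option Int := match st.2.1 with
        | some r => if cur > r then some cur else some r
        | none => some cur
      (cur, rm, md)) (0, none, 0)).2.2

-- ===== PRECONDITION & SPEC =====
def Spec_getK (seq : List Int) (a : Int) (b : Int) (out : Int) : Prop := out = getK_alt seq a b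
instance (seq : List Int) (a : Int) (b : Int) (out : Int) : Decidable (Spec_getK seq a b out) := by unfold Spec_getK; infer_instance

-- ===== CLAIM (what is proved, stated in full; the proofs are below) =====
def Claim_equal_getK : Prop := ∀ (seq : List Int) (a : Int) (b : Int), Dom_getK seq a b → Spec_getK seq a b (getK seq a b)

-- ===== LEMMAS AND PROOFS =====

/-- The walk path: cumulative ±1 sums of `seq` relative to `a`, starting from `c`. -/
def pathOf (a : Int) : List Int → Int → List Int
  | [], _ => []
  | k :: t, c =>
      let c' := if k == a then c + 1 else c - 1
      c' :: pathOf a t c'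

/-- State transformer shared by both sides: walk the path keeping
(running max of the strict prefix, best descent so far). -/
def descSt : List Int → Option Int → Int → Option Int × Int
  | [], rm, md => (rm, md)
  | x :: t, rm, md =>
      let md' := match rm with
        | some r => if r - x > md then r - x else md
        | none => md
      let rm' : Option Int := match rm with
        | some r => if x > r then some x else some r
        | none => some x
      descSt t rm' md'

/-- The body of A's second loop, over a fixed path `p`. -/
def stepA (p : List Int) (maxDesc i : Int) : Int :=
  let m := (PySem.List.max? (PySem.List.slice p (some 0) (some i)) (fun y => y)).getD 0
  let v := (PySem.List.pyGet? p i).getD 0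
  if m - v > maxDesc then m - v else maxDesc

/-- A's second loop, abstracted over the path. -/
def aLoop (p : List Int) : Int :=
  (PySem.List.pyRange 1 (p.length : Int) 1).foldl (stepA p) 0

theorem pathOf_fold (a : Int) (seq : List Int) (acc : List Int) (c : Int) :
    (seq.foldl (fun (st : List Int × Int) k =>
      let currentPlace := if k == a then st.2 + 1 else st.2 - 1
      (st.1 ++ [currentPlace], currentPlace)) (acc, c)).1 = acc ++ pathOf a seq c := by
  induction seq generalizing acc c with
  | nil => simp [pathOf]
  | cons k t ih =>
      rw [List.foldl_cons, ih]
      simp only [pathOf]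
      simp

theorem altFold_eq_descSt (a : Int) (seq : List Int) (c : Int) (rm : Option Int) (md : Int) :
    (seq.foldl (fun (st : Int × Option Int × Int) k =>
      let cur := st.1 + (if k == a then 1 else -1)
      let md := match st.2.1 with
        | some r => if r - cur > st.2.2 then r - cur else st.2.2
        | none => st.2.2
      let rm : Option Int := match st.2.1 with
        | some r => if cur > r then some cur else some r
        | none => some cur
      (cur, rm, md)) (c, rm, md)).2.2 = (descSt (pathOf a seq c) rm md).2 := by
  induction seq generalizing c rm md with
  | nil => simp [pathOf, descSt]
  | cons k t ih =>
      rw [List.foldl_cons, ih]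
      simp only [pathOf, descSt]
      by_cases h : (k == a) = true
      · simp only [h, if_true]
      · simp only [h, Bool.false_eq_true, if_false]
        have e : c + -1 = c - 1 := by ring
        rw [e]

theorem descSt_append (p q : List Int) (rm : Option Int) (md : Int) :
    descSt (p ++ q) rm md = descSt q (descSt p rm md).1 (descSt p rm md).2 := by
  induction p generalizing rm md with
  | nil => simp [descSt]
  | cons x t ih => simp [descSt, ih]

theorem descSt_fst_some (p : List Int) (r : Int) (md : Int) :
    (descSt p (some r) md).1 = some (p.foldl max r) := by
  induction p generalizing r md with
  | nil => simp [descSt]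
  | cons x t ih =>
      have hmax : (if x > r then some x else some r) = some (max r x) := by
        split_ifs with h
        · rw [max_eq_right (by omega : r ≤ x)]
        · rw [max_eq_left (by omega : x ≤ r)]
      show (descSt t (if x > r then some x else some r)
              (if r - x > md then r - x else md)).1 = some ((x :: t).foldl max r)
      rw [hmax, ih, List.foldl_cons]

theorem descSt_fst_none (p : List Int) (md : Int) :
    (descSt p none md).1 = PySem.List.max? p (fun y => y) := by
  cases p with
  | nil => simp [descSt, PySem.List.max?]
  | cons x t =>
      show (descSt t (some x) md).1 = _
      rw [descSt_fst_some, PySem.List.max?_id_cons]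

theorem stepA_agrees (p : List Int) (x : Int) (md : Int) (n : Nat)
    (h1 : 1 ≤ n) (h2 : n < p.length) :
    stepA (p ++ [x]) md (n : Int) = stepA p md (n : Int) := by
  simp only [stepA, PySem.List.pyGet?_natCast]
  rw [show ((0 : Int) = ((0 : Nat) : Int)) from rfl]
  rw [PySem.List.slice_natCast, PySem.List.slice_natCast]
  rw [List.drop_zero, List.drop_zero, List.take_append_of_le_length (by omega),
      List.getElem?_append_left (by omega)]

theorem aLoop_eq_descSt (p : List Int) : aLoop p = (descSt p none 0).2 := by
  induction p using List.reverseRecOn with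
  | nil => simp [aLoop, descSt]
  | append_singleton p x ih =>
      cases p with
      | nil => simp [aLoop, descSt]
      | cons y t =>
          have hn : (1 : Int) ≤ ((y :: t).length : Int) := by
            have : 1 ≤ (y :: t).length := by simp
            exact_mod_cast this
          have hlen : (((y :: t ++ [x]).length : Int)) = ((y :: t).length : Int) + 1 := by
            push_cast [List.length_append, List.length_singleton]
            ring
          rw [aLoop, hlen, PySem.List.pyRange_one_succ_right hn, List.foldl_append]
          have hfront : List.foldl (stepA (y :: t ++ [x])) 0
              (PySem.List.pyRange 1 ((y :: t).length : Int) 1) = aLoop (y :: t) := by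
            rw [aLoop]
            refine PySem.List.foldl_congr_mem _ _ _ _ ?_
            intro acc i hi
            have hi' := (PySem.List.mem_pyRange_one).1 hi
            obtain ⟨n, rfl⟩ : ∃ n : Nat, i = (n : Int) := ⟨i.toNat, by omega⟩
            exact stepA_agrees _ _ _ n (by exact_mod_cast hi'.1) (by exact_mod_cast hi'.2)
          rw [hfront, ih, List.foldl_cons, List.foldl_nil]
          have hslice : PySem.List.slice (y :: t ++ [x]) (some 0) (some ((y :: t).length : Int))
              = y :: t := by
            rw [show ((0 : Int) = ((0 : Nat) : Int)) from rfl, PySem.List.slice_natCast]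
            simp
          have hget : PySem.List.pyGet? (y :: t ++ [x]) ((y :: t).length : Int) = some x := by
            rw [PySem.List.pyGet?_natCast,
                show (y :: t ++ [x]) = (y :: t) ++ [x] from rfl,
                List.getElem?_append_right (le_refl _)]
            simp
          rw [descSt_append]
          rw [stepA, hslice, hget]
          have hrm : (descSt (y :: t) none 0).1 = some (t.foldl max y) := by
            rw [descSt_fst_none, PySem.List.max?_id_cons]
          rw [hrm]
          simp only [PySem.List.max?_id_cons, Option.getD_some, descSt]

theorem getK_eq (seq : List Int) (a b : Int) : getK seq a b = getK_alt seq a b := by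
  have hpath : (seq.foldl (fun (st : List Int × Int) k =>
      let currentPlace := if k == a then st.2 + 1 else st.2 - 1
      (st.1 ++ [currentPlace], currentPlace)) ([], 0)).1 = pathOf a seq 0 := by
    simpa using pathOf_fold a seq [] 0
  show aLoop ((seq.foldl (fun (st : List Int × Int) k =>
      let currentPlace := if k == a then st.2 + 1 else st.2 - 1
      (st.1 ++ [currentPlace], currentPlace)) ([], 0)).1) = getK_alt seq a b
  rw [hpath, aLoop_eq_descSt, getK_alt, altFold_eq_descSt]

-- ===== VERDICT (by name: the statement is the Claim_ definition above) =====
theorem getK_spec : Claim_equal_getK := by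
  intro seq a b _
  unfold Spec_getK
  exact getK_eq seq a b
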